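-- pv_equiv track=rewrite | github.com/ebaumeis/labscripts | allOHGQDtopgen.py | is_up
-- ===== SOURCE A (Python) =====
-- def is_up(index, ring_number):
--   last_inner_index = sum([ 6+x*12 for x in range(0, ring_number)])
--   ring_index = index - last_inner_index
--   line_index = ring_index%(2*ring_number + 1)
--   if line_index%2 == 1 or line_index==0:
--     return True
--   else:
--     return False
-- ===== SOURCE B (Python) =====
-- def is_up(index, ring_number):
--     # closed form for sum(6+12x for x in range(ring_number)): 6*r^2 with r = max(ring_number, 0)
--     r = max(ring_number, 0)
--     m = (index - 6 * r * r) % (2 * ring_number + 1)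
--     return m % 2 == 1 or m == 0
-- ===== Notes on version B (the rewrite author's own statement) =====
-- stated objective: faster
-- what changed: replaces the O(ring_number) loop-built prefix sum with the closed form 6*max(ring_number,0)^2
import Mathlib
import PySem

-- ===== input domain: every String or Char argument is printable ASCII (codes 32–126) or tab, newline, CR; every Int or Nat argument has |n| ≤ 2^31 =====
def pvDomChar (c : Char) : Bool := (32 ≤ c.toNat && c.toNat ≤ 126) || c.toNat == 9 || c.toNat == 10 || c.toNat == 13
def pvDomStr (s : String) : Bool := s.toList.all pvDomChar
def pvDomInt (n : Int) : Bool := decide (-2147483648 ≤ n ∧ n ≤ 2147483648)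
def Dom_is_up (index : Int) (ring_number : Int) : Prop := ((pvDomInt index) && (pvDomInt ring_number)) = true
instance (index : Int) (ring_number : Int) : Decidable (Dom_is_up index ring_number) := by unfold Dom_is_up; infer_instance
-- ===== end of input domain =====

-- B computes the prefix sum by the closed form 6*max(ring_number,0)^2 instead of A's O(ring_number) loop (faster).

-- ===== PORT A =====
def is_up (index : Int) (ring_number : Int) : Bool :=
  let last_inner_index := ((PySem.List.pyRange 0 ring_number 1).map (fun x => 6 + x * 12)).sum
  let ring_index := index - last_inner_index
  let line_index := PySem.Int.mod ring_index (2 * ring_number + 1)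
  if PySem.Int.mod line_index 2 == 1 || line_index == 0 then true else false

-- ===== PORT B =====
def is_up_alt (index : Int) (ring_number : Int) : Bool :=
  let r := max ring_number 0
  let m := PySem.Int.mod (index - 6 * r * r) (2 * ring_number + 1)
  PySem.Int.mod m 2 == 1 || m == 0

-- ===== PRECONDITION & SPEC =====
def Spec_is_up (index : Int) (ring_number : Int) (out : Bool) : Prop := out = is_up_alt index ring_number
instance (index : Int) (ring_number : Int) (out : Bool) : Decidable (Spec_is_up index ring_number out) := by unfold Spec_is_up; infer_instance

-- ===== CLAIM (what is proved, stated in full; the proofs are below) =====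
def Claim_equal_is_up : Prop := ∀ (index : Int) (ring_number : Int), Dom_is_up index ring_number → Spec_is_up index ring_number (is_up index ring_number)

-- ===== LEMMAS AND PROOFS =====

-- sum over range(n) of 6+12k equals 6n^2
theorem pv_sum_range (n : Nat) :
    ((List.range n).map (fun k : Nat => (6 : Int) + (k : Int) * 12)).sum = 6 * n * n := by
  induction n with
  | zero => simp
  | succ m ih =>
    rw [List.range_succ, List.map_append, List.sum_append, ih]
    simp only [List.map_cons, List.map_nil, List.sum_cons, List.sum_nil]
    push_cast
    ring

-- A's loop-built prefix sum equals B's closed form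
theorem pv_sum_closed (r : Int) :
    ((PySem.List.pyRange 0 r 1).map (fun x => 6 + x * 12)).sum = 6 * max r 0 * max r 0 := by
  rw [PySem.List.pyRange_one, List.map_map]
  have hmap : ((fun x : Int => 6 + x * 12) ∘ fun k : Nat => (0 : Int) + (k : Int))
      = fun k : Nat => (6 : Int) + (k : Int) * 12 := by
    funext k; simp
  have hmax : (((r - 0).toNat : Int)) = max r 0 := by omega
  rw [hmap, pv_sum_range, hmax]

-- ===== VERDICT (by name: the statement is the Claim_ definition above) =====
theorem is_up_spec : Claim_equal_is_up := by
  intro index ring_number _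
  unfold Spec_is_up is_up is_up_alt
  simp only [pv_sum_closed]
  split <;> simp_all
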